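-- pv_equiv track=rewrite | github.com/posl/comment_recommendation | script/split_gen/5_time/en/280_D/8.py | solve
-- ===== SOURCE A (Python) =====
-- def solve(k):
--     if k%2==0 or k%5==0:
--         return -1
--     else:
--         i=1
--         while True:
--             if (10**i)%k==1:
--                 return i
--             else:
--                 i+=1
-- ===== SOURCE B (Python) =====
-- def solve(k):
--     if k % 2 == 0 or k % 5 == 0:
--         return -1
--     # factor k by trial division to get Euler's totient phi(k)
--     n, phi, p = k, 1, 2
--     while p * p <= n:
--         if n % p == 0:
--             n //= p
--             phi *= p - 1
--             while n % p == 0: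
--                 n //= p
--                 phi *= p
--         p += 1
--     if n > 1:
--         phi *= n - 1
--     # the answer (multiplicative order of 10 mod k) is the least divisor d of phi
--     # with 10^d = 1 (mod k); enumerate divisors of phi in divisor pairs, sort, test
--     divs = []
--     i = 1
--     while i * i <= phi:
--         if phi % i == 0:
--             divs.append(i)
--             if i != phi // i:
--                 divs.append(phi // i)
--         i += 1
--     for d in sorted(divs):
--         if pow(10, d, k) == 1:
--             return d
-- ===== Notes on version B (the rewrite author's own statement) =====
-- stated objective: faster
-- what changed: B computes the answer as the least divisor of Euler's totient phi(k) satisfying pow(10,d,k)==1, obtaining phi(k) by trial-division factoring and enumerating divisors in sqrt(phi) pairs, instead of A's linear search multiplying out full bignum powers 10**i; Pre_ excludes odd k <= 1 not divisible by 5 (negative odd k and k=1), where A's while-True loop never returns.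
import Mathlib
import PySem

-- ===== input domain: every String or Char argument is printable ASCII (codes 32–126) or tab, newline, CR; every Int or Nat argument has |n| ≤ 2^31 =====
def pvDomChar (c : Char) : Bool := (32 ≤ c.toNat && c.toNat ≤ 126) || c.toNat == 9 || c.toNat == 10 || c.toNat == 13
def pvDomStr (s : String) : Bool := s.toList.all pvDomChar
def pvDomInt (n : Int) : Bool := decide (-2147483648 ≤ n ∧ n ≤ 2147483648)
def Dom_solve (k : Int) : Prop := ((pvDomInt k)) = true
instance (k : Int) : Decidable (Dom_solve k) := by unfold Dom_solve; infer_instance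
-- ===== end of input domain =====

-- B replaces A's linear search over 10**1, 10**2, … (full bignum powers) by a number-theoretic
-- algorithm: factor k by trial division to get Euler's totient phi(k), enumerate the divisors of
-- phi(k) in divisor pairs up to sqrt(phi), sort them, and return the least divisor d with
-- pow(10, d, k) == 1 (objective: faster — a different algorithm).

-- ===== PORT A =====
-- A's unbounded 'while True' loop, made total with a fuel guard (k.toNat steps; when
-- Python A returns, Pre_solve holds, k ≥ 3 is coprime to 10 and the multiplicative order of
-- 10 mod k is < k, so the fuel is never exhausted there).
def solveLoopA (k : Int) : Nat → Int → Int
  | 0, _ => 0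
  | fuel + 1, i => if PySem.Int.mod (10 ^ i.toNat) k = 1 then i else solveLoopA k fuel (i + 1)

def solve (k : Int) : Int :=
  if PySem.Int.mod k 2 = 0 ∨ PySem.Int.mod k 5 = 0 then -1
  else solveLoopA k k.toNat 1

-- ===== PORT B =====
-- inner 'while n % p == 0' strip loop (fuel n.toNat suffices: n strictly decreases)
def stripB : Nat → Int → Int → Int → Int × Int
  | 0, _, n, phi => (n, phi)
  | fuel + 1, p, n, phi =>
    if PySem.Int.mod n p = 0 then stripB fuel p (PySem.Int.floordiv n p) (phi * p)
    else (n, phi)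

-- outer 'while p * p <= n' factoring loop; returns the final (n, phi)
def phiLoopB : Nat → Int → Int → Int → Int × Int
  | 0, _, n, phi => (n, phi)
  | fuel + 1, p, n, phi =>
    if p * p ≤ n then
      if PySem.Int.mod n p = 0 then
        let n1 := PySem.Int.floordiv n p
        let s := stripB n1.toNat p n1 (phi * (p - 1))
        phiLoopB fuel (p + 1) s.1 s.2
      else phiLoopB fuel (p + 1) n phi
    else (n, phi)

-- 'while i * i <= phi' divisor-pair collection loop
def divLoopB : Nat → Int → Int → List Int → List Int
  | 0, _, _, divs => divs
  | fuel + 1, i, phi, divs =>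
    if i * i ≤ phi then
      divLoopB fuel (i + 1) phi
        (if PySem.Int.mod phi i = 0 then
          (divs ++ [i]) ++ (if i ≠ PySem.Int.floordiv phi i then [PySem.Int.floordiv phi i] else [])
         else divs)
    else divs

-- 'for d in sorted(divs): if pow(10, d, k) == 1: return d' (0 for the unreachable fall-through)
def findLoopB (k : Int) : List Int → Int
  | [] => 0
  | d :: rest => if PySem.Int.powMod 10 d.toNat k = 1 then d else findLoopB k rest

def solve_alt (k : Int) : Int :=
  if PySem.Int.mod k 2 = 0 ∨ PySem.Int.mod k 5 = 0 then -1
  else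
    let s := phiLoopB k.toNat 2 k 1
    let phi := if 1 < s.1 then s.2 * (s.1 - 1) else s.2
    findLoopB k (PySem.List.sorted (divLoopB (phi.toNat + 1) 1 phi []) (fun x => x))

-- ===== PRECONDITION & SPEC =====
-- Pre_ excludes exactly the inputs where Python A never returns: odd k ≤ 1 not divisible by 5
-- (negative odd k and k = 1), on which A's 'while True' loop runs forever.
def Pre_solve (k : Int) : Prop :=
  PySem.Int.mod k 2 = 0 ∨ PySem.Int.mod k 5 = 0 ∨ 1 < k
instance (k : Int) : Decidable (Pre_solve k) := by unfold Pre_solve; infer_instance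

def pvWitness_solve : Int := 3

def Spec_solve (k : Int) (out : Int) : Prop := out = solve_alt k
instance (k : Int) (out : Int) : Decidable (Spec_solve k out) := by unfold Spec_solve; infer_instance

-- ===== CLAIM (what is proved, stated in full; the proofs are below) =====
def Claim_equal_solve : Prop := ∀ (k : Int), Dom_solve k → Pre_solve k → Spec_solve k (solve k)

-- ===== LEMMAS AND PROOFS =====

-- '10^j % k == 1' (Python mod) is '10^j = 1' in ZMod k, for k ≥ 2.
theorem pow_mod_one_iff (K : Nat) (hK : 2 ≤ K) (j : Nat) :
    (PySem.Int.mod ((10:Int) ^ j) (K:Int) = 1) ↔ (10 : ZMod K) ^ j = 1 := by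
  have h1 : ((10:Int) ^ j) = (((10 ^ j : Nat)) : Int) := by push_cast; ring
  rw [h1, PySem.Int.mod_natCast]
  constructor
  · intro h
    have hmod : 10 ^ j % K = 1 := by exact_mod_cast h
    have hmc : (10:Nat) ^ j ≡ 1 [MOD K] := by
      unfold Nat.ModEq
      rw [hmod, Nat.mod_eq_of_lt (by omega)]
    have hz := (ZMod.natCast_eq_natCast_iff _ _ K).mpr hmc
    push_cast at hz
    exact hz
  · intro h
    have hz : (((10:Nat) ^ j : Nat) : ZMod K) = (((1:Nat)) : ZMod K) := by push_cast; exact h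
    have hm := (ZMod.natCast_eq_natCast_iff _ _ K).mp hz
    unfold Nat.ModEq at hm
    rw [Nat.mod_eq_of_lt (show 1 < K by omega)] at hm
    exact_mod_cast hm

-- A's loop returns the multiplicative order o of 10, given enough fuel.
theorem loopA_eq (k : Int) (K : Nat) (hk : k = (K:Int)) (hK : 2 ≤ K) (o : Nat)
    (ho : ∀ j : Nat, ((10 : ZMod K) ^ j = 1 ↔ o ∣ j)) :
    ∀ (fuel i : Nat), 1 ≤ i → i ≤ o → o < i + fuel → solveLoopA k fuel (i:Int) = (o:Int) := by
  intro fuel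
  induction fuel with
  | zero => intro i h1 h2 h3; omega
  | succ f ih =>
    intro i h1 h2 h3
    simp only [solveLoopA]
    rw [Int.toNat_natCast]
    by_cases hc : PySem.Int.mod ((10:Int) ^ i) k = 1
    · rw [if_pos hc]
      have hdvd : o ∣ i := (ho i).mp ((pow_mod_one_iff K hK i).mp (by rwa [hk] at hc))
      have : o ≤ i := Nat.le_of_dvd (by omega) hdvd
      have : i = o := by omega
      exact_mod_cast congrArg (fun n : Nat => (n:Int)) this
    · rw [if_neg hc]
      have hno : ¬ o ∣ i := fun hdvd =>
        hc (by rw [hk]; exact (pow_mod_one_iff K hK i).mpr ((ho i).mpr hdvd))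
      have hio : i ≠ o := by rintro rfl; exact hno dvd_rfl
      rw [show ((i:Int) + 1) = ((i + 1 : Nat) : Int) by push_cast; ring]
      exact ih (i+1) (by omega) (by omega) (by omega)

-- B's strip loop divides out all factors p from n, multiplying them into phi.
theorem stripB_spec : ∀ (fuel p n phi : Nat), 2 ≤ p → 1 ≤ n → n ≤ fuel →
    ∃ e m : Nat, stripB fuel (p:Int) (n:Int) (phi:Int) = ((m:Int), ((phi * p ^ e : Nat) : Int)) ∧
      n = m * p ^ e ∧ ¬ p ∣ m ∧ 1 ≤ m := by
  intro fuel
  induction fuel with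
  | zero => intro p n phi hp hn hf; omega
  | succ f ih =>
    intro p n phi hp hn hf
    simp only [stripB]
    by_cases hd : PySem.Int.mod (n:Int) (p:Int) = 0
    · rw [if_pos hd, PySem.Int.floordiv_natCast]
      have hdvd : p ∣ n := by
        rw [PySem.Int.mod_natCast] at hd
        exact Nat.dvd_of_mod_eq_zero (by exact_mod_cast hd)
      have hnp1 : 1 ≤ n / p := (Nat.one_le_div_iff (by omega)).mpr (Nat.le_of_dvd (by omega) hdvd)
      have hlt : n / p < n := Nat.div_lt_self (by omega) (by omega)
      rw [show ((phi:Int) * (p:Int)) = ((phi * p : Nat) : Int) by push_cast; ring]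
      obtain ⟨e, m, hres, hfac, hnd, hm⟩ := ih p (n / p) (phi * p) hp hnp1 (by omega)
      refine ⟨e + 1, m, ?_, ?_, hnd, hm⟩
      · rw [hres]
        congr 2
        ring
      · rw [← Nat.mul_div_cancel' hdvd, hfac]
        ring
    · rw [if_neg hd]
      have hnd : ¬ p ∣ n := by
        intro hdvd
        apply hd
        rw [PySem.Int.mod_natCast, Nat.mod_eq_zero_of_dvd hdvd]
        rfl

      exact ⟨0, n, by simp, by simp, hnd, hn⟩

-- B's factoring loop: the final wrapper value is phi * totient n.
theorem phiLoopB_spec : ∀ (fuel p n phi : Nat), 2 ≤ p → 1 ≤ n →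
    (∀ q, Nat.Prime q → q ∣ n → p ≤ q) → n + 1 ≤ p + fuel →
    ∃ m phi' : Nat, phiLoopB fuel (p:Int) (n:Int) (phi:Int) = ((m:Int), ((phi':Nat) : Int)) ∧
      1 ≤ m ∧ (if 1 < m then phi' * (m - 1) else phi') = phi * n.totient := by
  intro fuel
  induction fuel with
  | zero =>
    intro p n phi hp hn hfac hf
    have hn1 : n = 1 := by
      by_contra hne
      have h2 : 2 ≤ n := by omega
      have hq := hfac n.minFac (Nat.minFac_prime (by omega)) (Nat.minFac_dvd n)
      have := Nat.minFac_le (show 0 < n by omega)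
      omega
    subst hn1
    exact ⟨1, phi, rfl, le_refl 1, by simp [Nat.totient_one]⟩
  | succ f ih =>
    intro p n phi hp hn hfac hf
    simp only [phiLoopB]
    by_cases hg : (p:Int) * (p:Int) ≤ (n:Int)
    · rw [if_pos hg]
      have hgn : p * p ≤ n := by exact_mod_cast hg
      by_cases hd : PySem.Int.mod (n:Int) (p:Int) = 0
      · rw [if_pos hd, PySem.Int.floordiv_natCast, Int.toNat_natCast]
        have hdvd : p ∣ n := by
          rw [PySem.Int.mod_natCast] at hd
          exact Nat.dvd_of_mod_eq_zero (by exact_mod_cast hd)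
        have hp_prime : p.Prime := by
          have hq := hfac p.minFac (Nat.minFac_prime (by omega)) ((Nat.minFac_dvd p).trans hdvd)
          have hle := Nat.minFac_le (show 0 < p by omega)
          have heq : p.minFac = p := by omega
          rw [← heq]
          exact Nat.minFac_prime (by omega)
        have hnp1 : 1 ≤ n / p := (Nat.one_le_div_iff (by omega)).mpr (Nat.le_of_dvd (by omega) hdvd)
        have hnplt : n / p < n := Nat.div_lt_self (by omega) (by omega)
        rw [show ((phi:Int) * ((p:Int) - 1)) = ((phi * (p - 1) : Nat) : Int) by
          rw [Nat.cast_mul, Nat.cast_sub (show 1 ≤ p by omega)]; push_cast; ring]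
        obtain ⟨e, m, hstrip, hfaceq, hpm, hm1⟩ :=
          stripB_spec (n / p) p (n / p) (phi * (p - 1)) hp hnp1 (le_refl _)
        rw [hstrip]
        have hmdvd : m ∣ n / p := ⟨p ^ e, hfaceq⟩
        have hmle : m ≤ n / p := Nat.le_of_dvd (by omega) hmdvd
        rw [show ((p:Int) + 1) = ((p + 1 : Nat) : Int) by push_cast; ring]
        obtain ⟨M, phi2, hres, hM1, hwrap⟩ := ih (p + 1) m (phi * (p - 1) * p ^ e) (by omega)
          (by omega)
          (fun q hqp hqm => by
            have hqn : q ∣ n := (hqm.trans hmdvd).trans (Nat.div_dvd_of_dvd hdvd)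
            have hq1 := hfac q hqp hqn
            have hqne : q ≠ p := fun h => hpm (h ▸ hqm)
            omega)
          (by omega)
        refine ⟨M, phi2, hres, hM1, ?_⟩
        rw [hwrap]
        have hn_eq : n = p ^ (e + 1) * m := by
          rw [← Nat.mul_div_cancel' hdvd, hfaceq]
          ring
        have hcop : (p ^ (e + 1)).Coprime m :=
          Nat.Coprime.pow_left _ ((Nat.Prime.coprime_iff_not_dvd hp_prime).mpr hpm)
        rw [hn_eq, Nat.totient_mul hcop, Nat.totient_prime_pow hp_prime (Nat.succ_pos e)]
        simp only [Nat.succ_sub_one]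
        ring
      · rw [if_neg hd]
        have hnd : ¬ p ∣ n := by
          intro hdvd
          apply hd
          rw [PySem.Int.mod_natCast, Nat.mod_eq_zero_of_dvd hdvd]
          rfl
        rw [show ((p:Int) + 1) = ((p + 1 : Nat) : Int) by push_cast; ring]
        exact ih (p + 1) n phi (by omega) hn
          (fun q hqp hqn => by
            have := hfac q hqp hqn
            have : q ≠ p := fun h => hnd (h ▸ hqn)
            omega)
          (by omega)
    · rw [if_neg hg]
      have hgn : ¬ (p * p ≤ n) := fun h => hg (by exact_mod_cast h)
      refine ⟨n, phi, rfl, hn, ?_⟩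
      by_cases hn1 : 1 < n
      · have hprime : n.Prime := by
          by_contra hnp
          have hsq := Nat.minFac_sq_le_self (show 0 < n by omega) hnp
          have hple := hfac n.minFac (Nat.minFac_prime (by omega)) (Nat.minFac_dvd n)
          have : p * p ≤ n.minFac * n.minFac := Nat.mul_le_mul hple hple
          rw [pow_two] at hsq
          omega
        rw [if_pos hn1, Nat.totient_prime hprime]
      · have : n = 1 := by omega
        subst this
        simp [Nat.totient_one]

-- past the sqrt bound, every divisor has already been collected
theorem div_complete_final (i phi d : Nat) (hphi : 1 ≤ phi) (hd1 : 1 ≤ d) (hdvd : d ∣ phi)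
    (hi : phi < i * i) :
    (d < i ∧ d * d ≤ phi) ∨ (phi < d * d ∧ phi / d < i) := by
  by_cases hsq : d * d ≤ phi
  · left
    refine ⟨?_, hsq⟩
    by_contra h
    have : i ≤ d := by omega
    have : i * i ≤ d * d := Nat.mul_le_mul this this
    omega
  · right
    have hsq' : phi < d * d := by omega
    refine ⟨hsq', ?_⟩
    have hdle : d ≤ phi := Nat.le_of_dvd (by omega) hdvd
    have heq : d * (phi / d) = phi := Nat.mul_div_cancel' hdvd
    have hq1 : 1 ≤ phi / d := (Nat.one_le_div_iff (by omega)).mpr hdle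
    have hqd : phi / d < d := by nlinarith
    have hqq : phi / d * (phi / d) < i * i := by nlinarith
    by_contra h
    have : i ≤ phi / d := by omega
    have : i * i ≤ phi / d * (phi / d) := Nat.mul_le_mul this this
    omega

-- B's divisor loop collects exactly the divisors of phi, without duplicates.
theorem divLoopB_spec : ∀ (fuel i phi : Nat) (divs : List Int), 1 ≤ i → 1 ≤ phi →
    phi + 1 ≤ i + fuel →
    (∀ x ∈ divs, ∃ d : Nat, x = (d:Int) ∧ 1 ≤ d ∧ d ∣ phi ∧
        ((d < i ∧ d * d ≤ phi) ∨ (phi < d * d ∧ phi / d < i))) →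
    (∀ d : Nat, 1 ≤ d → d ∣ phi →
        ((d < i ∧ d * d ≤ phi) ∨ (phi < d * d ∧ phi / d < i)) → (d:Int) ∈ divs) →
    divs.Nodup →
    (∀ x ∈ divLoopB fuel (i:Int) (phi:Int) divs, ∃ d : Nat, x = (d:Int) ∧ 1 ≤ d ∧ d ∣ phi) ∧
    (∀ d : Nat, 1 ≤ d → d ∣ phi → (d:Int) ∈ divLoopB fuel (i:Int) (phi:Int) divs) ∧
    (divLoopB fuel (i:Int) (phi:Int) divs).Nodup := by
  intro fuel
  induction fuel with
  | zero =>
    intro i phi divs hi1 hphi hf hmem hcomp hnd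
    simp only [divLoopB]
    have hii : phi < i * i := by nlinarith
    refine ⟨fun x hx => ?_, fun d hd1 hdd => ?_, hnd⟩
    · obtain ⟨d, hxd, h1, h2, _⟩ := hmem x hx
      exact ⟨d, hxd, h1, h2⟩
    · exact hcomp d hd1 hdd (div_complete_final i phi d hphi hd1 hdd hii)
  | succ f ih =>
    intro i phi divs hi1 hphi hf hmem hcomp hnd
    simp only [divLoopB]
    by_cases hg : (i:Int) * (i:Int) ≤ (phi:Int)
    · rw [if_pos hg]
      have hgn : i * i ≤ phi := by exact_mod_cast hg
      rw [show ((i:Int) + 1) = ((i + 1 : Nat) : Int) by push_cast; ring]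
      by_cases hd : PySem.Int.mod (phi:Int) (i:Int) = 0
      · rw [if_pos hd, PySem.Int.floordiv_natCast]
        have hdvd : i ∣ phi := by
          rw [PySem.Int.mod_natCast] at hd
          exact Nat.dvd_of_mod_eq_zero (by exact_mod_cast hd)
        have hiL : i * (phi / i) = phi := Nat.mul_div_cancel' hdvd
        have hL1 : 1 ≤ phi / i := (Nat.one_le_div_iff (by omega)).mpr (Nat.le_of_dvd (by omega) hdvd)
        have hLdvd : (phi / i) ∣ phi := Nat.div_dvd_of_dvd hdvd
        have hiLe : i ≤ phi / i := Nat.le_of_mul_le_mul_left (by rw [hiL]; exact hgn) (by omega)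
        by_cases hLi : phi / i = i
        · rw [if_neg (by simp [hLi] : ¬ ((i:Int) ≠ ((phi / i : Nat):Int))), List.append_nil]
          apply ih (i + 1) phi (divs ++ [(i:Int)]) (by omega) hphi (by omega)
          · intro x hx
            rcases List.mem_append.mp hx with hx | hx
            · obtain ⟨d, hxd, h1, h2, h3⟩ := hmem x hx
              exact ⟨d, hxd, h1, h2, by omega⟩
            · have : x = (i:Int) := by simpa using hx
              exact ⟨i, this, by omega, hdvd, Or.inl ⟨by omega, hgn⟩⟩
          · intro d hd1 hdd hcase
            rcases hcase with ⟨hlt, hsq⟩ | ⟨hsq, hdiv⟩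
            · rcases Nat.lt_succ_iff_lt_or_eq.mp hlt with h | h
              · exact List.mem_append_left _ (hcomp d hd1 hdd (Or.inl ⟨h, hsq⟩))
              · subst h; exact List.mem_append_right _ (by simp)
            · rcases Nat.lt_succ_iff_lt_or_eq.mp hdiv with h | h
              · exact List.mem_append_left _ (hcomp d hd1 hdd (Or.inr ⟨hsq, h⟩))
              · -- phi / d = i forces d = phi / i = i, contradicting phi < d * d
                have hde : d * i = phi := by
                  have hmd := Nat.mul_div_cancel' hdd
                  rwa [h] at hmd
                have hdL : d = phi / i := by
                  have : d * i = (phi / i) * i := by rw [hde, Nat.div_mul_cancel hdvd]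
                  exact Nat.eq_of_mul_eq_mul_right (by omega) this
                rw [hdL, hLi] at hsq
                omega
          · rw [List.nodup_append]
            refine ⟨hnd, List.nodup_singleton _, ?_⟩
            intro x hx y hy
            have hyi : y = (i:Int) := by simpa using hy
            obtain ⟨d, hxd, h1, h2, h3⟩ := hmem x hx
            subst hyi
            rw [hxd]
            intro hcast
            have : d = i := by exact_mod_cast hcast
            subst this
            rcases h3 with ⟨h, _⟩ | ⟨h, _⟩
            · omega
            · omega
        · rw [if_pos (show ((i:Int) ≠ ((phi / i : Nat):Int)) from by
            intro h; exact hLi (by exact_mod_cast h.symm))]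
          have hiLlt : i < phi / i := by omega
          have hLsq : phi < (phi / i) * (phi / i) := by nlinarith
          have hphiL : phi / (phi / i) = i := Nat.div_div_self hdvd (by omega)
          apply ih (i + 1) phi ((divs ++ [(i:Int)]) ++ [((phi / i : Nat):Int)]) (by omega) hphi
            (by omega)
          · intro x hx
            rcases List.mem_append.mp hx with hx | hx
            · rcases List.mem_append.mp hx with hx | hx
              · obtain ⟨d, hxd, h1, h2, h3⟩ := hmem x hx
                exact ⟨d, hxd, h1, h2, by omega⟩
              · have : x = (i:Int) := by simpa using hx
                exact ⟨i, this, by omega, hdvd, Or.inl ⟨by omega, hgn⟩⟩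
            · have : x = ((phi / i : Nat):Int) := by simpa using hx
              exact ⟨phi / i, this, by omega, hLdvd, Or.inr ⟨hLsq, by omega⟩⟩
          · intro d hd1 hdd hcase
            rcases hcase with ⟨hlt, hsq⟩ | ⟨hsq, hdiv⟩
            · rcases Nat.lt_succ_iff_lt_or_eq.mp hlt with h | h
              · exact List.mem_append_left _
                  (List.mem_append_left _ (hcomp d hd1 hdd (Or.inl ⟨h, hsq⟩)))
              · subst h
                exact List.mem_append_left _ (List.mem_append_right _ (by simp))
            · rcases Nat.lt_succ_iff_lt_or_eq.mp hdiv with h | h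
              · exact List.mem_append_left _
                  (List.mem_append_left _ (hcomp d hd1 hdd (Or.inr ⟨hsq, h⟩)))
              · have hde : d * i = phi := by
                  have hmd := Nat.mul_div_cancel' hdd
                  rwa [h] at hmd
                have hdL : d = phi / i := by
                  have : d * i = (phi / i) * i := by rw [hde, Nat.div_mul_cancel hdvd]
                  exact Nat.eq_of_mul_eq_mul_right (by omega) this
                subst hdL
                exact List.mem_append_right _ (by simp)
          · rw [List.nodup_append]
            refine ⟨?_, List.nodup_singleton _, ?_⟩
            · rw [List.nodup_append]
              refine ⟨hnd, List.nodup_singleton _, ?_⟩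
              intro x hx y hy
              have hyi : y = (i:Int) := by simpa using hy
              obtain ⟨d, hxd, h1, h2, h3⟩ := hmem x hx
              subst hyi
              rw [hxd]
              intro hcast
              have : d = i := by exact_mod_cast hcast
              subst this
              rcases h3 with ⟨h, _⟩ | ⟨h, _⟩ <;> omega
            · intro x hx y hy
              have hyL : y = ((phi / i : Nat):Int) := by simpa using hy
              subst hyL
              rcases List.mem_append.mp hx with hx | hx
              · obtain ⟨d, hxd, h1, h2, h3⟩ := hmem x hx
                rw [hxd]
                intro hcast
                have hdL : d = phi / i := by exact_mod_cast hcast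
                subst hdL
                rcases h3 with ⟨h, _⟩ | ⟨_, h⟩
                · omega
                · rw [hphiL] at h; omega
              · have hxi : x = (i:Int) := by simpa using hx
                rw [hxi]
                intro hcast
                have : i = phi / i := by exact_mod_cast hcast
                omega
      · rw [if_neg hd]
        have hndvd : ¬ i ∣ phi := by
          intro hdvd
          apply hd
          rw [PySem.Int.mod_natCast, Nat.mod_eq_zero_of_dvd hdvd]
          rfl
        apply ih (i + 1) phi divs (by omega) hphi (by omega)
        · intro x hx
          obtain ⟨d, hxd, h1, h2, h3⟩ := hmem x hx
          exact ⟨d, hxd, h1, h2, by omega⟩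
        · intro d hd1 hdd hcase
          rcases hcase with ⟨hlt, hsq⟩ | ⟨hsq, hdiv⟩
          · rcases Nat.lt_succ_iff_lt_or_eq.mp hlt with h | h
            · exact hcomp d hd1 hdd (Or.inl ⟨h, hsq⟩)
            · subst h; exact absurd hdd hndvd
          · rcases Nat.lt_succ_iff_lt_or_eq.mp hdiv with h | h
            · exact hcomp d hd1 hdd (Or.inr ⟨hsq, h⟩)
            · have : d * i = phi := by
                have hmd := Nat.mul_div_cancel' hdd
                rwa [h] at hmd
              exact absurd ⟨d, by rw [← this]; ring⟩ hndvd
        · exact hnd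
    · rw [if_neg hg]
      have hgn : phi < i * i := by
        have := Int.not_le.mp hg
        exact_mod_cast this
      refine ⟨fun x hx => ?_, fun d hd1 hdd => ?_, hnd⟩
      · obtain ⟨d, hxd, h1, h2, _⟩ := hmem x hx
        exact ⟨d, hxd, h1, h2⟩
      · exact hcomp d hd1 hdd (div_complete_final i phi d hphi hd1 hdd hgn)

-- B's find loop returns t on a strictly increasing list whose elements below t all fail the test.
theorem findLoopB_eq (k t : Int) : ∀ L : List Int, L.Pairwise (· < ·) → t ∈ L →
    PySem.Int.powMod 10 t.toNat k = 1 →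
    (∀ x ∈ L, x < t → ¬ PySem.Int.powMod 10 x.toNat k = 1) →
    findLoopB k L = t := by
  intro L
  induction L with
  | nil => intro _ ht; simp at ht
  | cons h rest ih =>
    intro hpw htmem hP hmin
    simp only [findLoopB]
    by_cases hc : PySem.Int.powMod 10 h.toNat k = 1
    · rw [if_pos hc]
      rcases List.mem_cons.mp htmem with heq | htr
      · exact heq.symm
      · exact absurd hc (hmin h List.mem_cons_self ((List.pairwise_cons.mp hpw).1 t htr))
    · rw [if_neg hc]
      rcases List.mem_cons.mp htmem with heq | htr
      · exact absurd (heq ▸ hP) hc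
      · exact ih (List.pairwise_cons.mp hpw).2 htr hP
          (fun x hx hxt => hmin x (List.mem_cons_of_mem _ hx) hxt)

-- ===== VERDICT (by name: the statement is the Claim_ definition above) =====
theorem solve_spec : Claim_equal_solve := by
  intro k hdom hpre
  unfold Spec_solve
  by_cases hbr : PySem.Int.mod k 2 = 0 ∨ PySem.Int.mod k 5 = 0
  · simp only [solve, solve_alt]
    rw [if_pos hbr, if_pos hbr]
  · have hk1 : 1 < k := by
      rcases hpre with h | h | h
      · exact absurd (Or.inl h) hbr
      · exact absurd (Or.inr h) hbr
      · exact h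
    set K := k.toNat with hKdef
    have hk : k = (K:Int) := (Int.toNat_of_nonneg (by omega)).symm
    have hK : 2 ≤ K := by omega
    have hmod2 : ¬ PySem.Int.mod k 2 = 0 := fun h => hbr (Or.inl h)
    have hmod5 : ¬ PySem.Int.mod k 5 = 0 := fun h => hbr (Or.inr h)
    have hnot2 : ¬ (2:Nat) ∣ K := by
      intro h2
      apply hmod2
      rw [PySem.Int.mod_eq_zero_iff_dvd, hk]
      exact_mod_cast h2
    have hnot5 : ¬ (5:Nat) ∣ K := by
      intro h5
      apply hmod5
      rw [PySem.Int.mod_eq_zero_iff_dvd, hk]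
      exact_mod_cast h5
    have hcop : Nat.Coprime 10 K := by
      have h2 : Nat.Coprime 2 K := (Nat.Prime.coprime_iff_not_dvd (by norm_num)).mpr hnot2
      have h5 : Nat.Coprime 5 K := (Nat.Prime.coprime_iff_not_dvd (by norm_num)).mpr hnot5
      have : Nat.Coprime (2 * 5) K := Nat.coprime_mul_iff_left.mpr ⟨h2, h5⟩
      simpa using this
    haveI : NeZero K := ⟨by omega⟩
    set o := orderOf (10 : ZMod K) with hodef
    have h10t : (10 : ZMod K) ^ K.totient = 1 := by
      have hmc := Nat.ModEq.pow_totient hcop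
      have hz := (ZMod.natCast_eq_natCast_iff _ _ K).mpr hmc
      push_cast at hz
      exact hz
    have htpos : 0 < K.totient := Nat.totient_pos.mpr (by omega)
    have hodvd : o ∣ K.totient := orderOf_dvd_of_pow_eq_one h10t
    have hopos : 0 < o :=
      orderOf_pos_iff.mpr (isOfFinOrder_iff_pow_eq_one.mpr ⟨_, htpos, h10t⟩)
    have hole : o ≤ K.totient := Nat.le_of_dvd htpos hodvd
    have htlt : K.totient < K := Nat.totient_lt K (by omega)
    have ho : ∀ j : Nat, ((10 : ZMod K) ^ j = 1 ↔ o ∣ j) :=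
      fun j => orderOf_dvd_iff_pow_eq_one.symm
    -- A computes o
    have hA : solve k = (o:Int) := by
      simp only [solve]
      rw [if_neg hbr]
      rw [show (1:Int) = ((1:Nat):Int) by norm_num]
      exact loopA_eq k K hk hK o ho K 1 (le_refl 1) (by omega) (by omega)
    -- B computes o
    have hB : solve_alt k = (o:Int) := by
      simp only [solve_alt]
      rw [if_neg hbr]
      obtain ⟨m, phi', hres, hm1, hwrap⟩ := phiLoopB_spec K 2 K 1 (le_refl 2) (by omega)
        (fun q hq _ => hq.two_le) (by omega)
      push_cast at hres
      rw [hk]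
      simp only [Int.toNat_natCast]
      rw [hres]
      rw [show ((m:Int), (phi':Int)).1 = (m:Int) from rfl,
          show ((m:Int), (phi':Int)).2 = (phi':Int) from rfl]
      set Φ := K.totient with hΦdef
      have hphiInt : (if (1:Int) < (m:Int) then (phi':Int) * ((m:Int) - 1) else (phi':Int))
          = ((Φ:Nat) : Int) := by
        by_cases h1m : 1 < m
        · rw [if_pos (by exact_mod_cast h1m)]
          rw [if_pos h1m, one_mul] at hwrap
          rw [show ((phi':Int) * ((m:Int) - 1)) = ((phi' * (m - 1) : Nat) : Int) by
            rw [Nat.cast_mul, Nat.cast_sub (by omega)]; push_cast; ring]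
          exact_mod_cast congrArg (fun n : Nat => (n:Int)) hwrap
        · rw [if_neg (by exact_mod_cast h1m)]
          rw [if_neg h1m, one_mul] at hwrap
          exact_mod_cast congrArg (fun n : Nat => (n:Int)) hwrap
      rw [hphiInt, Int.toNat_natCast]
      obtain ⟨Hmem, Hcomp, Hnodup⟩ := divLoopB_spec (Φ + 1) 1 Φ [] (le_refl 1) htpos
        (by omega)
        (by intro x hx; simp at hx)
        (by
          intro d hd1 hdd hcase
          exfalso
          rcases hcase with ⟨h, _⟩ | ⟨_, h⟩
          · omega
          · have : 1 ≤ Φ / d := (Nat.one_le_div_iff (by omega)).mpr (Nat.le_of_dvd htpos hdd)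
            omega)
        List.nodup_nil
      simp only [Nat.cast_one] at Hmem Hcomp Hnodup
      set R := divLoopB (Φ + 1) 1 (Φ:Int) [] with hRdef
      set T := (PySem.List.pyRange 1 ((Φ:Int) + 1) 1).filter (fun x => decide (x ∣ (Φ:Int)))
        with hTdef
      have hTnd : T.Nodup := (PySem.List.nodup_pyRange_one _ _).filter _
      have hTpw : T.Pairwise (· < ·) := (PySem.List.pairwise_lt_pyRange_one _ _).filter _
      have hmemT : ∀ x : Int, x ∈ T ↔ 1 ≤ x ∧ x < (Φ:Int) + 1 ∧ x ∣ (Φ:Int) := by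
        intro x
        simp [hTdef, List.mem_filter, PySem.List.mem_pyRange_one, and_assoc]
      have hperm : T.Perm R := by
        rw [List.perm_ext_iff_of_nodup hTnd Hnodup]
        intro a
        constructor
        · intro ha
          obtain ⟨ha1, ha2, ha3⟩ := (hmemT a).mp ha
          have hae : a = ((a.toNat : Nat) : Int) := (Int.toNat_of_nonneg (by omega)).symm
          rw [hae]
          apply Hcomp a.toNat (by omega)
          rw [hae] at ha3
          exact_mod_cast ha3
        · intro ha
          obtain ⟨d, rfl, hd1, hdd⟩ := Hmem a ha
          refine (hmemT _).mpr ⟨by exact_mod_cast hd1, ?_, by exact_mod_cast hdd⟩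
          have : d ≤ Φ := Nat.le_of_dvd htpos hdd
          exact_mod_cast by omega
      rw [PySem.List.sorted_eq_of_perm_of_pairwise_lt R T _ hperm hTpw]
      apply findLoopB_eq ((K:Nat):Int) ((o:Nat):Int) T hTpw
      · refine (hmemT _).mpr ⟨by exact_mod_cast hopos, ?_, by exact_mod_cast hodvd⟩
        exact_mod_cast by omega
      · rw [Int.toNat_natCast, PySem.Int.powMod_eq]
        exact (pow_mod_one_iff K hK o).mpr ((ho o).mpr dvd_rfl)
      · intro x hx hxo hP
        obtain ⟨hx1, _, hxd⟩ := (hmemT x).mp hx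
        have hxe : x = ((x.toNat : Nat) : Int) := (Int.toNat_of_nonneg (by omega)).symm
        rw [PySem.Int.powMod_eq] at hP
        rw [hxe] at hP
        have h1 : (10 : ZMod K) ^ x.toNat = 1 := (pow_mod_one_iff K hK x.toNat).mp hP
        have hdvd : o ∣ x.toNat := (ho _).mp h1
        have : o ≤ x.toNat := Nat.le_of_dvd (by omega) hdvd
        omega
    rw [hA, hB]
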